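-- pv_equiv track=rewrite | github.com/juniorhoza/testSolutions | SingleSalary.py | findSingleSalary
-- ===== SOURCE A (Python) =====
-- def findSingleSalary(salaries:list)->int:
--     '''
--
--     :param salaries:
--     :return: the single salary
--     :Approch:  the function findSingleSalary iterates through the array and compares each element to all other elements.
--      When it finds an element that doesn't have a duplicate, it returns that element as the single salary.
--     '''
--     singleSalary=0
--     for count ,i in enumerate(salaries):
--         for j in range(count+1,len(salaries)):
--             if salaries[j] == i:
--                 break
--             else:
--                 singleSalary=i
--     return singleSalary
-- ===== SOURCE B (Python) =====
-- def findSingleSalary(salaries: list) -> int: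
--     # build the candidates (elements differing from their immediate successor), then take the last
--     cands = [a for a, b in zip(salaries, salaries[1:]) if a != b]
--     return cands[-1] if cands else 0
-- ===== Notes on version B (the rewrite author's own statement) =====
-- stated objective: simpler
-- what changed: Replaces A's nested scan with mutable accumulator by a two-stage pipeline: build the list of elements differing from their immediate successor via zip with the shifted list, then select its last element (0 if none).
import Mathlib
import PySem

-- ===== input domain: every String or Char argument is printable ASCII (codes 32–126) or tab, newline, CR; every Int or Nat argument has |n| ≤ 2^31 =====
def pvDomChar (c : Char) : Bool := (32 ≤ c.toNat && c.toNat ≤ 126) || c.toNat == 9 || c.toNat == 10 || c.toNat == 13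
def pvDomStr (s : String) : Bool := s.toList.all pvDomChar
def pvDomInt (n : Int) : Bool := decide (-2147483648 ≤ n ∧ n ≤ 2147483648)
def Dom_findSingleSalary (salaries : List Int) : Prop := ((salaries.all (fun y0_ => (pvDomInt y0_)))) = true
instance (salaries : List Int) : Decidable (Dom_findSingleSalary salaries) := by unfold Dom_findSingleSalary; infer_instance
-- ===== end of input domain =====

-- B replaces A's quadratic nested scan by a linear build-then-select pipeline over consecutive pairs (simpler and faster).


-- ===== PORT A =====
-- inner 'for j in range(count+1, len(salaries))' loop with break: acc is singleSalary
def fssInner (salaries : List Int) (i : Int) : Int → List Int → Int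
  | acc, [] => acc
  | acc, j :: js =>
    if PySem.List.pyGetD salaries j 0 = i then acc
    else fssInner salaries i i js

def findSingleSalary (salaries : List Int) : Int :=
  (PySem.List.enumerate salaries 0).foldl
    (fun acc p =>
      fssInner salaries p.2 acc (PySem.List.pyRange (p.1 + 1) (salaries.length : Int) 1))
    0

-- ===== PORT B =====
def findSingleSalary_alt (salaries : List Int) : Int :=
  let cands :=
    ((salaries.zip (PySem.List.slice salaries (some 1) none)).filter
      (fun p => p.1 != p.2)).map (·.1)
  if cands.isEmpty then 0 else PySem.List.pyGetD cands (-1) 0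

-- ===== PRECONDITION & SPEC =====
def Spec_findSingleSalary (salaries : List Int) (out : Int) : Prop := out = findSingleSalary_alt salaries
instance (salaries : List Int) (out : Int) : Decidable (Spec_findSingleSalary salaries out) := by unfold Spec_findSingleSalary; infer_instance

-- ===== CLAIM (what is proved, stated in full; the proofs are below) =====
def Claim_equal_findSingleSalary : Prop := ∀ (salaries : List Int), Dom_findSingleSalary salaries → Spec_findSingleSalary salaries (findSingleSalary salaries)

-- ===== LEMMAS AND PROOFS =====

-- once singleSalary has been set to i, the rest of the inner loop keeps it i
theorem fssInner_self (salaries : List Int) (i : Int) (l : List Int) :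
    fssInner salaries i i l = i := by
  induction l with
  | nil => rfl
  | cons j js ih => simp [fssInner, ih]

-- a nonempty inner loop only looks at its first index
theorem fssInner_cons (salaries : List Int) (i acc j : Int) (js : List Int) :
    fssInner salaries i acc (j :: js) =
      if PySem.List.pyGetD salaries j 0 = i then acc else i := by
  simp [fssInner, fssInner_self]

-- the common fold over consecutive pairs both programs compute
def pairStep (acc : Int) (p : Int × Int) : Int := if p.2 = p.1 then acc else p.1

-- A's enumerate fold, generalized over a processed prefix, is the pair fold over the suffix
theorem findA_suffix (salaries : List Int) :
    ∀ (suf pre : List Int) (acc : Int), salaries = pre ++ suf →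
    (PySem.List.enumerate suf (pre.length : Int)).foldl
      (fun acc p =>
        fssInner salaries p.2 acc (PySem.List.pyRange (p.1 + 1) (salaries.length : Int) 1))
      acc
    = (suf.zip suf.tail).foldl pairStep acc := by
  intro suf
  induction suf with
  | nil => intro pre acc h; simp [PySem.List.enumerate_nil]
  | cons x xs ih =>
    intro pre acc h
    rw [PySem.List.enumerate_cons]
    simp only [List.foldl_cons]
    cases xs with
    | nil =>
      have hlen : (salaries.length : Int) = (pre.length : Int) + 1 := by
        subst h; simp
      rw [hlen, PySem.List.pyRange_one_eq_nil (by omega)]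
      simp [fssInner, PySem.List.enumerate_nil]
    | cons y ys =>
      have hlt : (pre.length : Int) + 1 < (salaries.length : Int) := by
        subst h; simp
      rw [PySem.List.pyRange_one_cons hlt, fssInner_cons]
      have hget : PySem.List.pyGetD salaries ((pre.length : Int) + 1) 0 = y := by
        subst h
        have : ((pre.length : Int) + 1) = (((pre.length + 1 : Nat)) : Int) := by push_cast; ring
        rw [this, PySem.List.pyGetD_natCast]
        simp [List.getD]
      rw [hget]
      have hrec := ih (pre ++ [x]) (if y = x then acc else x) (by simpa using h)
      simp only [List.length_append, List.length_cons, List.length_nil] at hrec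
      have hcast : ((pre.length : Int) + 1) = (((pre.length + 1 : Nat)) : Int) := by push_cast; ring
      rw [hcast, hrec]
      simp [pairStep]

-- the pair fold is the last kept first-component, or the accumulator if none is kept
theorem foldl_pairStep_getLastD (l : List (Int × Int)) :
    ∀ acc : Int,
      l.foldl pairStep acc = ((l.filter (fun p => p.1 != p.2)).map (·.1)).getLastD acc := by
  induction l with
  | nil => intro acc; rfl
  | cons p ps ih =>
    intro acc
    by_cases h : p.2 = p.1
    · simp [pairStep, List.filter, h, ih]
    · have h' : (p.1 != p.2) = true := by simp [bne]; exact fun e => h e.symm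
      simp only [List.foldl_cons, pairStep, if_neg h, List.filter_cons, h', if_true,
        List.map_cons]
      rw [ih]
      cases hc : (ps.filter (fun p => p.1 != p.2)).map (·.1) with
      | nil => simp
      | cons z zs =>
        cases hzz : (z :: zs).getLast? with
        | none => simp [List.getLast?_eq_none_iff] at hzz
        | some w => simp [hzz]

-- xs[-1] with default on a nonempty list is getLast
theorem pyGetD_neg_one_getLastD (c : List Int) (h : ¬ c.isEmpty) :
    PySem.List.pyGetD c (-1) 0 = c.getLastD 0 := by
  cases c with
  | nil => simp at h
  | cons x xs =>
    simp [PySem.List.pyGetD, PySem.List.pyGet?, PySem.List.pyIdx?, List.getLastD_eq_getLast?,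
      List.getLast?_eq_some_getLast, List.getLast_eq_getElem]
    rfl

-- ===== VERDICT (by name: the statement is the Claim_ definition above) =====
theorem findSingleSalary_spec : Claim_equal_findSingleSalary := by
  intro salaries _
  unfold Spec_findSingleSalary findSingleSalary findSingleSalary_alt
  have hA := findA_suffix salaries salaries [] 0 rfl
  simp only [List.length_nil, Nat.cast_zero] at hA
  rw [hA]
  rw [PySem.List.slice_from_one]
  rw [foldl_pairStep_getLastD]
  set c := ((salaries.zip salaries.tail).filter (fun p => p.1 != p.2)).map (·.1) with hc
  by_cases he : c.isEmpty
  · rw [if_pos he]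
    rw [List.isEmpty_iff] at he
    simp [he]
  · rw [if_neg he, pyGetD_neg_one_getLastD c (by simp [he])]
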